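-- pv_equiv track=rewrite | github.com/pritesh-shrivastava/chess-rag | rag/retriever.py | _prefix_keys
-- ===== SOURCE A (Python) =====
-- def _prefix_keys(moves: list[str]) -> list[str]:
--     keys: list[str] = []
--     parts: list[str] = []
--     for idx, move in enumerate(moves, start=1):
--         if idx % 2 == 1:
--             parts.append(f"{(idx + 1) // 2}. {move}")
--         else:
--             parts[-1] += f" {move}"
--         keys.append(" ".join(parts))
--     return keys
-- ===== SOURCE B (Python) =====
-- def _prefix_keys(moves: list[str]) -> list[str]:
--     # Two passes: format each move into a flat token, then scan to running prefixes.
--     tokens = [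
--         f"{i // 2 + 1}. {move}" if i % 2 == 0 else move
--         for i, move in enumerate(moves)
--     ]
--     keys: list[str] = []
--     acc = ""
--     for j, tok in enumerate(tokens):
--         acc = tok if j == 0 else f"{acc} {tok}"
--         keys.append(acc)
--     return keys
-- ===== Notes on version B (the rewrite author's own statement) =====
-- stated objective: simpler
-- what changed: Replaces A's single interleaved loop that mutates the last element of a growing parts list and re-joins it each iteration with two flat passes: first format every move into a standalone token, then a linear scan that extends one accumulator string and records each running prefix.
import Mathlib
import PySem

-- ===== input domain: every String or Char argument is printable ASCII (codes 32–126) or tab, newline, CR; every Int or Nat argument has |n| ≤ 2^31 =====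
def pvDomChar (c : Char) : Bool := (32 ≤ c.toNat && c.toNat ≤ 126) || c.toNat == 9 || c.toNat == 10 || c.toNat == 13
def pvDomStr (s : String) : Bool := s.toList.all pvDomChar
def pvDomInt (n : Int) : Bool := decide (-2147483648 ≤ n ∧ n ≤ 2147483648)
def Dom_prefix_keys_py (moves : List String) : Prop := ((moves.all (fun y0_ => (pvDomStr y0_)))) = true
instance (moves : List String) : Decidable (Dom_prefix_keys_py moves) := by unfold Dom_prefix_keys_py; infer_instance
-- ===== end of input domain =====

-- B builds the same incremental prefix keys in two flat passes (format tokens, then scan) instead of A's interleaved loop that mutates parts[-1] and re-joins; objective: simpler.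
-- ===== PORT A =====
-- the loop body: parts[-1] += f" {move}" is get-last-then-set-last; parts is nonempty whenever that branch runs (idx even => a white move was appended before)
def pvA_loop : List (Int × String) → List String → List String → List String
  | [], _parts, keys => keys
  | (idx, move) :: rest, parts, keys =>
    let parts' := if PySem.Int.mod idx 2 == 1
      then parts ++ [PySem.Int.toStr (PySem.Int.floordiv (idx + 1) 2) ++ ". " ++ move]
      else parts.dropLast ++ [parts.getLast! ++ " " ++ move]
    pvA_loop rest parts' (keys ++ [PySem.Str.join " " parts'])

def prefix_keys_py (moves : List String) : List String :=
  pvA_loop (PySem.List.enumerate moves 1) [] []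

-- ===== PORT B =====
-- first pass: the token list comprehension
def pvB_token (p : Int × String) : String :=
  if PySem.Int.mod p.1 2 == 0 then PySem.Int.toStr (PySem.Int.floordiv p.1 2 + 1) ++ ". " ++ p.2 else p.2

-- second pass: the accumulator scan
def pvB_scan : List String → Int → String → List String
  | [], _j, _acc => []
  | tok :: rest, j, acc =>
    let acc' := if j == 0 then tok else acc ++ " " ++ tok
    acc' :: pvB_scan rest (j + 1) acc'

def prefix_keys_py_alt (moves : List String) : List String :=
  pvB_scan ((PySem.List.enumerate moves).map pvB_token) 0 ""

-- ===== PRECONDITION & SPEC =====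
def Spec_prefix_keys_py (moves : List String) (out : List String) : Prop := out = prefix_keys_py_alt moves
instance (moves : List String) (out : List String) : Decidable (Spec_prefix_keys_py moves out) := by unfold Spec_prefix_keys_py; infer_instance

-- ===== CLAIM (what is proved, stated in full; the proofs are below) =====
def Claim_equal_prefix_keys_py : Prop := ∀ (moves : List String), Dom_prefix_keys_py moves → Spec_prefix_keys_py moves (prefix_keys_py moves)

-- ===== LEMMAS AND PROOFS =====

-- ===== VERDICT (by name: the statement is the Claim_ definition above) =====
-- Python's floor-mod/floor-div by the positive literal 2 agree with Int.emod/ediv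
theorem pvFmod_two (a : Int) : a.fmod 2 = a % 2 := by rw [Int.fmod_eq_emod]; simp
theorem pvFdiv_two (a : Int) : a.fdiv 2 = a / 2 := by rw [Int.fdiv_eq_ediv]; simp

-- join lemmas at String level, lifted from PySem.Chars via toList injectivity
theorem strJoin_cons_cons (sep p q : String) (r : List String) :
    PySem.Str.join sep (p :: q :: r) = p ++ sep ++ PySem.Str.join sep (q :: r) := by
  apply String.toList_inj.mp
  simp [PySem.Str.toList_join, String.toList_append, PySem.Chars.join_cons_cons]

theorem strJoin_singleton (sep p : String) : PySem.Str.join sep [p] = p := by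
  apply String.toList_inj.mp
  simp [PySem.Str.toList_join, PySem.Chars.join_singleton]

-- appending one more part to a nonempty parts list appends sep ++ t to the join
-- cons onto a nonempty parts list
theorem strJoin_cons_ne (sep p : String) (l : List String) (h : l ≠ []) :
    PySem.Str.join sep (p :: l) = p ++ sep ++ PySem.Str.join sep l := by
  cases l with
  | nil => exact absurd rfl h
  | cons q r => exact strJoin_cons_cons sep p q r

theorem strJoin_concat (sep : String) (ps : List String) (t : String) (h : ps ≠ []) :
    PySem.Str.join sep (ps ++ [t]) = PySem.Str.join sep ps ++ sep ++ t := by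
  induction ps with
  | nil => exact absurd rfl h
  | cons p ps ih =>
    cases ps with
    | nil => simp [strJoin_cons_cons, strJoin_singleton]
    | cons q r =>
      have h2 := ih (by simp)
      simp only [List.cons_append] at h2 ⊢
      rw [strJoin_cons_ne _ _ _ (by simp), strJoin_cons_cons, h2]
      simp [String.append_assoc]

-- extending the last part in place appends t to the join
theorem strJoin_extend_last (sep : String) (ps : List String) (t : String) (h : ps ≠ []) :
    PySem.Str.join sep (ps.dropLast ++ [ps.getLast! ++ t]) = PySem.Str.join sep ps ++ t := by
  induction ps with
  | nil => exact absurd rfl h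
  | cons p ps ih =>
    cases ps with
    | nil => simp [strJoin_singleton, List.getLast!]
    | cons q r =>
      have h2 := ih (by simp)
      have hgl : (p :: q :: r).getLast! = (q :: r).getLast! := by
        simp [List.getLast!, List.getLast]
      rw [List.dropLast_cons_of_ne_nil (by simp), hgl, List.cons_append,
        strJoin_cons_ne _ _ _ (by simp), h2, strJoin_cons_cons]
      simp [String.append_assoc]

-- the main loop invariant: A's state (parts, keys) at 0-based position n matches
-- B's scan over the remaining tokens with acc = the join of parts
theorem pvMain (moves : List String) : ∀ (n : Nat) (parts keys : List String),
    (parts = [] ↔ n = 0) →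
    pvA_loop (PySem.List.enumerate moves ((n : Int) + 1)) parts keys
      = keys ++ pvB_scan ((PySem.List.enumerate moves (n : Int)).map pvB_token)
          (n : Int) (PySem.Str.join " " parts) := by
  induction moves with
  | nil => intro n parts keys _; simp [PySem.List.enumerate_nil, pvA_loop, pvB_scan]
  | cons m rest ih =>
    intro n parts keys hpe
    rw [PySem.List.enumerate_cons, PySem.List.enumerate_cons]
    simp only [List.map_cons, pvA_loop, pvB_scan]
    rcases Nat.even_or_odd n with hpar | hpar
    · -- n even: white move, idx = n+1 odd; A appends a new numbered part
      obtain ⟨k, hk⟩ := hpar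
      have hcA : (PySem.Int.mod ((n : Int) + 1) 2 == 1) = true := by
        simp only [PySem.Int.mod, pvFmod_two, beq_iff_eq]
        omega
      have htok : pvB_token ((n : Int), m)
          = PySem.Int.toStr (PySem.Int.floordiv ((n : Int) + 1 + 1) 2) ++ ". " ++ m := by
        have hcB : (PySem.Int.mod (n : Int) 2 == 0) = true := by
          simp only [PySem.Int.mod, pvFmod_two, beq_iff_eq]; omega
        have hnum : PySem.Int.floordiv ((n : Int) + 1 + 1) 2
            = PySem.Int.floordiv (n : Int) 2 + 1 := by
          simp only [PySem.Int.floordiv, pvFdiv_two]; omega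
        simp only [pvB_token]
        rw [hcB, if_pos rfl, hnum]
      rw [hcA, if_pos rfl, ← htok]
      set tok := pvB_token ((n : Int), m) with htokdef
      have hacc : PySem.Str.join " " (parts ++ [tok])
          = if ((n : Int) == 0) = true then tok else PySem.Str.join " " parts ++ " " ++ tok := by
        by_cases hn : n = 0
        · subst hn
          rw [hpe.mpr rfl]
          simp [strJoin_singleton]
        · rw [if_neg (by simp [hn])]
          exact strJoin_concat _ _ _ (fun he => hn (hpe.mp he))
      have hcall := ih (n + 1) (parts ++ [tok]) (keys ++ [PySem.Str.join " " (parts ++ [tok])])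
        (by simp)
      push_cast at hcall
      rw [hcall, hacc]
      simp
    · -- n odd: black move, idx = n+1 even; A extends parts[-1]
      obtain ⟨k, hk⟩ := hpar
      have hn0 : n ≠ 0 := by omega
      have hp : parts ≠ [] := fun he => hn0 (hpe.mp he)
      have hcA : (PySem.Int.mod ((n : Int) + 1) 2 == 1) = false := by
        simp only [PySem.Int.mod, pvFmod_two, beq_eq_false_iff_ne, ne_eq]
        omega
      have htok : pvB_token ((n : Int), m) = m := by
        have hcB : (PySem.Int.mod (n : Int) 2 == 0) = false := by
          simp only [PySem.Int.mod, pvFmod_two, beq_eq_false_iff_ne, ne_eq]; omega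
        simp only [pvB_token]
        rw [hcB, if_neg (by simp)]
      have hj : ((n : Int) == 0) = false := by simp [hn0]
      rw [hcA, if_neg (by simp), htok, hj, if_neg (by simp)]
      have hparts : parts.dropLast ++ [parts.getLast! ++ " " ++ m]
          = parts.dropLast ++ [parts.getLast! ++ (" " ++ m)] := by
        simp [String.append_assoc]
      have hacc : PySem.Str.join " " (parts.dropLast ++ [parts.getLast! ++ (" " ++ m)])
          = PySem.Str.join " " parts ++ " " ++ m := by
        rw [strJoin_extend_last _ _ _ hp, String.append_assoc]
      have hcall := ih (n + 1) (parts.dropLast ++ [parts.getLast! ++ " " ++ m])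
        (keys ++ [PySem.Str.join " " (parts.dropLast ++ [parts.getLast! ++ " " ++ m])])
        (by simp)
      push_cast at hcall
      rw [hcall, hparts, hacc]
      simp [String.append_assoc]

theorem prefix_keys_py_spec : Claim_equal_prefix_keys_py := by
  intro moves _
  unfold Spec_prefix_keys_py prefix_keys_py prefix_keys_py_alt
  have := pvMain moves 0 [] [] (by simp)
  simpa [strJoin_singleton] using this
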